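-- pv_equiv track=rewrite | github.com/tmuntianu/symbends | bends.py | create_intersection_pairings
-- ===== SOURCE A (Python) =====
-- import itertools
--
-- def validate_intersections(intersections):
--     if len(intersections[1]) != len(intersections[0]):
--         return False
--     return len(intersections[0]) % 2 != 0
--
-- def create_intersection_pairings(w1_ints, w2_ints, alpha_or_gamma=True):
--     if validate_intersections([w1_ints, w2_ints]):
--         return None
--     # we know from validate_intersections w1, w2 ints must be even
--     n_bitstrings = ["".join(seq) for seq in itertools.product("01", repeat=(len(w1_ints)))]
--     # generate all possible combinations
--     # now we add to the list of maps based on the bitstrings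
--     all_intersections = []
--     for bitstring in n_bitstrings:
--         one_intersection = dict()
--         for idx, bit in enumerate(bitstring):
--             # NOT SURE IF THESE ARE THE CORRECT PAIRINGS
--             one_intersection[w1_ints[idx]] = bit == '0'
--             if alpha_or_gamma:
--                 one_intersection[w2_ints[idx]] = bit != '0'
--             else:
--                 one_intersection[w2_ints[idx]] = bit == '0'
--         all_intersections.append(one_intersection)
--     return all_intersections
-- ===== SOURCE B (Python) =====
-- def create_intersection_pairings(w1_ints, w2_ints, alpha_or_gamma=True):
--     if len(w2_ints) == len(w1_ints) and len(w1_ints) % 2 != 0: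
--         return None
--     # iterative doubling: each existing partial assignment spawns the bit-0
--     # child then the bit-1 child, positions processed left to right
--     result = [dict()]
--     for idx in range(len(w1_ints)):
--         k1 = w1_ints[idx]
--         nxt = []
--         for parent in result:
--             for bit0 in (True, False):
--                 child = dict(parent)
--                 child[k1] = bit0
--                 child[w2_ints[idx]] = (not bit0) if alpha_or_gamma else bit0
--                 nxt.append(child)
--         result = nxt
--     return result
-- ===== Notes on version B (the rewrite author's own statement) =====
-- stated objective: alternative
-- what changed: Replaces 'enumerate all 2^n bitstrings with itertools.product, then fill each dict from scratch by re-scanning the whole bitstring' with iterative doubling: start from [{}] and for each index let every partial assignment spawn its bit-0 child then its bit-1 child, extending the parent dict by the two new keys.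
import Mathlib
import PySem

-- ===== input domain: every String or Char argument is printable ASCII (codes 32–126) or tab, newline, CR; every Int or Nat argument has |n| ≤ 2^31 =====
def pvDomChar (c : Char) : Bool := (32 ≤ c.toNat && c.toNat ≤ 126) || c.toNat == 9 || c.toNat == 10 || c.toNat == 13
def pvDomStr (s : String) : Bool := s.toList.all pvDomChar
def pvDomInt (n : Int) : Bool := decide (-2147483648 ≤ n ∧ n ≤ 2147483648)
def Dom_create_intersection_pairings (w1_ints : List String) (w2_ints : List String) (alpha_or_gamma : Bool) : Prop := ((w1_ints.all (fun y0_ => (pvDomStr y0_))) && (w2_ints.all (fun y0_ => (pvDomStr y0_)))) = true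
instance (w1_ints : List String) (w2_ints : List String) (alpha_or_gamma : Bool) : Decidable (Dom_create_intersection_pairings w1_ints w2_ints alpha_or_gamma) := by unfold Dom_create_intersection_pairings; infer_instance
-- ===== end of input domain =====

-- B replaces A's bitstring enumeration with iterative doubling of partial assignments (alternative decomposition, same cost).


-- ===== PORT A =====
-- helper: Python validate_intersections(intersections) on the two-element list [w1, w2]
def validate_intersections (intersections : List (List String)) : Bool :=
  if (PySem.List.pyGetD intersections 1 []).length ≠ (PySem.List.pyGetD intersections 0 []).length then
    false
  else
    decide ((PySem.List.pyGetD intersections 0 []).length % 2 ≠ 0)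

-- helper: itertools.product("01", repeat=n) — first position varies slowest (CPython's order)
def prod01 : Nat → List (List Char)
  | 0 => [[]]
  | n + 1 => (['0', '1'] : List Char).flatMap (fun c => (prod01 n).map (fun seq => c :: seq))

-- helper: A's inner loop "for idx, bit in enumerate(bitstring): …" building one_intersection
-- (w1_ints[idx] / w2_ints[idx] ported with pyGetD: exact under Pre_, which excludes the IndexError inputs)
def buildDict (w1_ints w2_ints : List String) (alpha_or_gamma : Bool) (bits : List Char) :
    PySem.Dict String Bool :=
  (PySem.List.enumerate bits 0).foldl
    (fun d p =>
      (d.insert (PySem.List.pyGetD w1_ints p.1 "") (p.2 == '0')).insert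
        (PySem.List.pyGetD w2_ints p.1 "")
        (if alpha_or_gamma then p.2 != '0' else p.2 == '0'))
    PySem.Dict.empty

def create_intersection_pairings (w1_ints : List String) (w2_ints : List String) (alpha_or_gamma : Bool) : Option (List (List (String × Bool))) :=
  if validate_intersections [w1_ints, w2_ints] then none
  else
    -- n_bitstrings = ["".join(seq) for seq in itertools.product("01", repeat=len(w1_ints))]
    let n_bitstrings : List String := (prod01 w1_ints.length).map (fun seq => String.ofList seq)
    some (n_bitstrings.map (fun bitstring =>
      (buildDict w1_ints w2_ints alpha_or_gamma bitstring.toList).items))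

-- ===== PORT B =====
-- helper: the child dict "child = dict(parent); child[w1_ints[idx]] = bit0; child[w2_ints[idx]] = …"
def altChild (w1_ints w2_ints : List String) (alpha_or_gamma : Bool) (idx : Int)
    (parent : PySem.Dict String Bool) (bit0 : Bool) : PySem.Dict String Bool :=
  (parent.insert (PySem.List.pyGetD w1_ints idx "") bit0).insert
    (PySem.List.pyGetD w2_ints idx "") (if alpha_or_gamma then !bit0 else bit0)

-- helper: one doubling step — "nxt = []; for parent in result: for bit0 in (True, False): … nxt.append(child)"
def altStep (w1_ints w2_ints : List String) (alpha_or_gamma : Bool)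
    (result : List (PySem.Dict String Bool)) (idx : Int) : List (PySem.Dict String Bool) :=
  result.foldl
    (fun nxt parent =>
      nxt ++ [altChild w1_ints w2_ints alpha_or_gamma idx parent true,
              altChild w1_ints w2_ints alpha_or_gamma idx parent false])
    []

def create_intersection_pairings_alt (w1_ints : List String) (w2_ints : List String) (alpha_or_gamma : Bool) : Option (List (List (String × Bool))) :=
  if w2_ints.length == w1_ints.length && decide (w1_ints.length % 2 ≠ 0) then none
  else
    some (((PySem.List.pyRange 0 w1_ints.length 1).foldl
      (altStep w1_ints w2_ints alpha_or_gamma) [PySem.Dict.empty]).map PySem.Dict.items)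

-- ===== PRECONDITION & SPEC =====
-- Pre_ excludes exactly the inputs where the Python A raises IndexError (w2_ints shorter than w1_ints,
-- so w2_ints[idx] is evaluated out of range); A returns normally everywhere else.
def Pre_create_intersection_pairings (w1_ints : List String) (w2_ints : List String) (alpha_or_gamma : Bool) : Prop :=
  w1_ints.length ≤ w2_ints.length
instance (w1_ints : List String) (w2_ints : List String) (alpha_or_gamma : Bool) : Decidable (Pre_create_intersection_pairings w1_ints w2_ints alpha_or_gamma) := by unfold Pre_create_intersection_pairings; infer_instance

def pvWitness_create_intersection_pairings : List String × List String × Bool := (["a", "b"], ["c", "d"], true)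

def Spec_create_intersection_pairings (w1_ints : List String) (w2_ints : List String) (alpha_or_gamma : Bool) (out : Option (List (List (String × Bool)))) : Prop := out = create_intersection_pairings_alt w1_ints w2_ints alpha_or_gamma
instance (w1_ints : List String) (w2_ints : List String) (alpha_or_gamma : Bool) (out : Option (List (List (String × Bool)))) : Decidable (Spec_create_intersection_pairings w1_ints w2_ints alpha_or_gamma out) := by unfold Spec_create_intersection_pairings; infer_instance

-- ===== CLAIM (what is proved, stated in full; the proofs are below) =====
def Claim_equal_create_intersection_pairings : Prop := ∀ (w1_ints : List String) (w2_ints : List String) (alpha_or_gamma : Bool), Dom_create_intersection_pairings w1_ints w2_ints alpha_or_gamma → Pre_create_intersection_pairings w1_ints w2_ints alpha_or_gamma → Spec_create_intersection_pairings w1_ints w2_ints alpha_or_gamma (create_intersection_pairings w1_ints w2_ints alpha_or_gamma)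

-- ===== LEMMAS AND PROOFS =====

theorem guard_eq (w1 w2 : List String) :
    validate_intersections [w1, w2]
      = (w2.length == w1.length && decide (w1.length % 2 ≠ 0)) := by
  simp only [validate_intersections]
  by_cases h : w2.length = w1.length <;>
    simp [PySem.List.pyGetD, PySem.List.pyGet?, PySem.List.pyIdx?, h]

-- altStep is a flatMap of the two children over the current list
theorem altStep_eq_flatMap (w1 w2 : List String) (alpha : Bool)
    (res : List (PySem.Dict String Bool)) (idx : Int) :
    altStep w1 w2 alpha res idx
      = res.flatMap (fun parent =>
          [altChild w1 w2 alpha idx parent true, altChild w1 w2 alpha idx parent false]) := by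
  exact List.flatMap_eq_foldl.symm

theorem length_prod01 (n : Nat) : ∀ bits ∈ prod01 n, bits.length = n := by
  induction n with
  | zero => simp [prod01]
  | succ n ih =>
    intro bits h
    simp only [prod01, List.flatMap_cons, List.flatMap_nil, List.append_nil, List.mem_append,
      List.mem_map] at h
    rcases h with ⟨s, hs, rfl⟩ | ⟨s, hs, rfl⟩ <;> simp [ih s hs]

-- itertools.product's prepend recursion equals the snoc (doubling) recursion
theorem prod01_succ_snoc (n : Nat) :
    prod01 (n + 1) = (prod01 n).flatMap (fun r => [r ++ ['0'], r ++ ['1']]) := by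
  induction n with
  | zero => rfl
  | succ n ih =>
    calc prod01 (n + 1 + 1)
        = (['0','1'] : List Char).flatMap
            (fun c => ((prod01 n).flatMap (fun r => [r ++ ['0'], r ++ ['1']])).map (c :: ·)) := by
          rw [show prod01 (n+1+1)
                = (['0','1'] : List Char).flatMap (fun c => (prod01 (n+1)).map (c :: ·)) from rfl,
             ih]
      _ = (prod01 (n + 1)).flatMap (fun r => [r ++ ['0'], r ++ ['1']]) := by
          rw [show prod01 (n+1)
                = (['0','1'] : List Char).flatMap (fun c => (prod01 n).map (c :: ·)) from rfl]
          simp [List.map_flatMap, List.flatMap_map]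

theorem buildDict_snoc (w1 w2 : List String) (alpha : Bool) (bits : List Char) (c : Char) :
    buildDict w1 w2 alpha (bits ++ [c])
      = ((buildDict w1 w2 alpha bits).insert
            (PySem.List.pyGetD w1 (bits.length : Int) "") (c == '0')).insert
          (PySem.List.pyGetD w2 (bits.length : Int) "")
          (if alpha then c != '0' else c == '0') := by
  simp [buildDict, PySem.List.enumerate_append, PySem.List.enumerate_cons,
    PySem.List.enumerate_nil, List.foldl_append]

theorem main_inv (w1 w2 : List String) (alpha : Bool) (k : Nat) :
    (PySem.List.pyRange 0 (k : Int) 1).foldl (altStep w1 w2 alpha) [PySem.Dict.empty]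
      = (prod01 k).map (buildDict w1 w2 alpha) := by
  induction k with
  | zero => rfl
  | succ k ih =>
    rw [show ((k + 1 : Nat) : Int) = (k : Int) + 1 by push_cast; ring,
       PySem.List.pyRange_one_succ_right (by positivity), List.foldl_append, List.foldl_cons,
       List.foldl_nil, ih, altStep_eq_flatMap, prod01_succ_snoc, List.map_flatMap,
       List.flatMap_map]
    refine List.flatMap_congr (fun r hr => ?_)
    have hlen : r.length = k := length_prod01 k r hr
    simp only [List.map_cons, List.map_nil]
    rw [buildDict_snoc w1 w2 alpha r '0', buildDict_snoc w1 w2 alpha r '1',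
       hlen]
    cases alpha <;> simp [altChild]

-- ===== VERDICT (by name: the statement is the Claim_ definition above) =====
theorem create_intersection_pairings_spec : Claim_equal_create_intersection_pairings := by
  intro w1 w2 alpha _hdom _hpre
  unfold Spec_create_intersection_pairings
  unfold create_intersection_pairings create_intersection_pairings_alt
  rw [guard_eq]
  split
  · rfl
  · rw [main_inv]
    simp [List.map_map, Function.comp, String.toList_ofList]
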